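-- pv_equiv track=rewrite | github.com/yugsharma1711/DS-ALGO | Arrays/rowMax1.py | mostRightBS
-- ===== SOURCE A (Python) =====
-- def mostRightBS(arr, low, high, curr_index = -1):
--     if low > high:
--         return curr_index
--     mid = low + high
--     mid = mid // 2
--     if arr[mid] == 1:
--         return mostRightBS(arr, mid+1, high, mid)
--     else:
--         return mostRightBS(arr, mid+1, high, curr_index)
-- ===== SOURCE B (Python) =====
-- def mostRightBS(arr, low, high, curr_index=-1):
--     curr = curr_index
--     while low <= high:
--         mid = (low + high) // 2
--         if arr[mid] == 1:
--             curr = mid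
--         low = mid + 1
--     return curr
-- ===== Notes on version B (the rewrite author's own statement) =====
-- stated objective: alternative
-- what changed: Replaces A's tail recursion (two recursive call sites threading an accumulator) by an iterative while-loop with a single mutable accumulator updated in place; same probe sequence, no recursion.
import Mathlib
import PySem

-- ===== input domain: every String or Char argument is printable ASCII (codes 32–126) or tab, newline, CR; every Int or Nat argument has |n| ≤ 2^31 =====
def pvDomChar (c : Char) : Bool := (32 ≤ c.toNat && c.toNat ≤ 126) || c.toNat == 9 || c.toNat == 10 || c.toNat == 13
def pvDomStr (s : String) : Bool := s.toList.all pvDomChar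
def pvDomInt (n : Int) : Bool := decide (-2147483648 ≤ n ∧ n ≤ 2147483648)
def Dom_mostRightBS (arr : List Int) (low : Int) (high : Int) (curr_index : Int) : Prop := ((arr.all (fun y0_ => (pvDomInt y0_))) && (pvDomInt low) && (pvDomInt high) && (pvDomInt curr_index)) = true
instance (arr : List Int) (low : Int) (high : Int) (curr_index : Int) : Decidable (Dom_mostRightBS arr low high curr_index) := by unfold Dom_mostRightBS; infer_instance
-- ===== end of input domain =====

-- B differs from A by decomposition only: A is tail-recursive with two call sites
-- threading an accumulator; B is an iterative while-loop updating one accumulator.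

-- ===== PORT A =====
-- arr[mid] is PySem.List.pyGet? (Python negative-index rule); '.getD 0' is only a
-- totalisation device: Pre_mostRightBS excludes every input on which the lookup is none
-- (Python raises IndexError there).
def mostRightBS (arr : List Int) (low : Int) (high : Int) (curr_index : Int) : Int :=
  if low > high then curr_index
  else
    let mid := PySem.Int.floordiv (low + high) 2
    if (PySem.List.pyGet? arr mid).getD 0 = 1 then
      mostRightBS arr (mid + 1) high mid
    else
      mostRightBS arr (mid + 1) high curr_index
termination_by (high + 1 - low).toNat
decreasing_by
  all_goals
    have h := PySem.Int.floordiv_two_mid_bounds (lo := low) (hi := high) (by omega)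
    omega

-- ===== PORT B =====
-- the while-loop of Source B: state = (low, curr), one step per iteration
def pvLoop_mostRightBS (arr : List Int) (high : Int) (low : Int) (curr : Int) : Int :=
  if low ≤ high then
    let mid := PySem.Int.floordiv (low + high) 2
    pvLoop_mostRightBS arr high (mid + 1)
      (if (PySem.List.pyGet? arr mid).getD 0 = 1 then mid else curr)
  else curr
termination_by (high + 1 - low).toNat
decreasing_by
  have h := PySem.Int.floordiv_two_mid_bounds (lo := low) (hi := high) (by omega)
  omega

def mostRightBS_alt (arr : List Int) (low : Int) (high : Int) (curr_index : Int) : Int :=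
  pvLoop_mostRightBS arr high low curr_index

-- ===== PRECONDITION & SPEC =====
-- Pre_ excludes exactly the inputs on which A raises IndexError: when the range is
-- non-empty, the probed indices all lie between the first midpoint and high, and the
-- first midpoint and high are both probed, so A returns iff both are valid Python indices.
def Pre_mostRightBS (arr : List Int) (low : Int) (high : Int) (curr_index : Int) : Prop :=
  low > high ∨
    (-(arr.length : Int) ≤ PySem.Int.floordiv (low + high) 2 ∧ high < (arr.length : Int))
instance (arr : List Int) (low : Int) (high : Int) (curr_index : Int) : Decidable (Pre_mostRightBS arr low high curr_index) := by unfold Pre_mostRightBS; infer_instance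

def pvWitness_mostRightBS : List Int × Int × Int × Int := ([1, 0, 1], 0, 2, -1)

def Spec_mostRightBS (arr : List Int) (low : Int) (high : Int) (curr_index : Int) (out : Int) : Prop := out = mostRightBS_alt arr low high curr_index
instance (arr : List Int) (low : Int) (high : Int) (curr_index : Int) (out : Int) : Decidable (Spec_mostRightBS arr low high curr_index out) := by unfold Spec_mostRightBS; infer_instance

-- ===== CLAIM (what is proved, stated in full; the proofs are below) =====
def Claim_equal_mostRightBS : Prop := ∀ (arr : List Int) (low : Int) (high : Int) (curr_index : Int), Dom_mostRightBS arr low high curr_index → Pre_mostRightBS arr low high curr_index → Spec_mostRightBS arr low high curr_index (mostRightBS arr low high curr_index)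

-- ===== LEMMAS AND PROOFS =====

theorem mostRightBS_eq_loop (arr : List Int) (low high curr_index : Int) :
    mostRightBS arr low high curr_index = pvLoop_mostRightBS arr high low curr_index := by
  fun_induction mostRightBS arr low high curr_index with
  | case1 low curr_index h =>
      rw [pvLoop_mostRightBS]
      simp [show ¬ low ≤ high by omega]
  | case2 low curr_index h mid hm ih =>
      rw [pvLoop_mostRightBS, if_pos (show low ≤ high by omega)]
      show mostRightBS arr (mid + 1) high mid =
        pvLoop_mostRightBS arr high (mid + 1)
          (if (PySem.List.pyGet? arr mid).getD 0 = 1 then mid else curr_index)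
      rw [if_pos hm]; exact ih
  | case3 low curr_index h mid hm ih =>
      rw [pvLoop_mostRightBS, if_pos (show low ≤ high by omega)]
      show mostRightBS arr (mid + 1) high curr_index =
        pvLoop_mostRightBS arr high (mid + 1)
          (if (PySem.List.pyGet? arr mid).getD 0 = 1 then mid else curr_index)
      rw [if_neg hm]; exact ih

-- ===== VERDICT (by name: the statement is the Claim_ definition above) =====
theorem mostRightBS_spec : Claim_equal_mostRightBS := by
  intro arr low high curr_index _ _
  unfold Spec_mostRightBS mostRightBS_alt
  exact mostRightBS_eq_loop arr low high curr_index
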